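-- pv_equiv track=rewrite | github.com/lucas-isenmann/fragments-assembly | module/solver1.py | build_common_prefix_suffix_matrix
-- ===== SOURCE A (Python) =====
-- def longest_common_prefix_suffix(prefix, suffix):
--     """
--     Finds the number of common characters between the prefix and suffix.
--     """
--     m, n = len(prefix), len(suffix)
--     count = 0
--     for k in range(1, min(m, n) + 1): # TODO Optimize with decreasing k
--         if prefix[:k] == suffix[-k:]: # TODO Optimize without recomputing the substrings
--             count = k
--     return count
--
-- def build_common_prefix_suffix_matrix(sequences):
--     """
--     Constructs the 2D array f where f[i][j] is the number of common characters
--     between the prefix of i and the suffix of j.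
--     """
--     n = len(sequences)
--     f = [[0] * n for _ in range(n)]
--
--     for i in range(n):
--         for j in range(n):
--             prefix = sequences[i]
--             suffix = sequences[j]
--             f[i][j] = longest_common_prefix_suffix(prefix, suffix)
--     return f
-- ===== SOURCE B (Python) =====
-- def _prefix_function(w):
--     """Standard KMP prefix function: pi[i] = length of the longest proper
--     border (prefix that is also a suffix) of w[:i+1]."""
--     pi = [0] * len(w)
--     for i in range(1, len(w)):
--         k = pi[i - 1]
--         while k > 0 and w[i] != w[k]:
--             k = pi[k - 1]
--         if w[i] == w[k]:
--             k = k + 1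
--         pi[i] = k
--     return pi
--
--
-- def build_common_prefix_suffix_matrix(sequences):
--     """f[i][j] = longest k with sequences[i][:k] == sequences[j][-k:], found
--     per pair by one KMP prefix-function pass over prefix + '\x00' + suffix."""
--     f = []
--     for p in sequences:
--         row = []
--         for s in sequences:
--             w = p + "\x00" + s
--             row.append(_prefix_function(w)[-1])
--         f.append(row)
--     return f
-- ===== Notes on version B (the rewrite author's own statement) =====
-- stated objective: alternative
-- what changed: Replaces A's per-pair scan that re-slices and compares the k-prefix against the k-suffix for every k with a single KMP prefix-function pass over prefix + '\x00' + suffix, whose last value is the overlap length.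
import Mathlib
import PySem

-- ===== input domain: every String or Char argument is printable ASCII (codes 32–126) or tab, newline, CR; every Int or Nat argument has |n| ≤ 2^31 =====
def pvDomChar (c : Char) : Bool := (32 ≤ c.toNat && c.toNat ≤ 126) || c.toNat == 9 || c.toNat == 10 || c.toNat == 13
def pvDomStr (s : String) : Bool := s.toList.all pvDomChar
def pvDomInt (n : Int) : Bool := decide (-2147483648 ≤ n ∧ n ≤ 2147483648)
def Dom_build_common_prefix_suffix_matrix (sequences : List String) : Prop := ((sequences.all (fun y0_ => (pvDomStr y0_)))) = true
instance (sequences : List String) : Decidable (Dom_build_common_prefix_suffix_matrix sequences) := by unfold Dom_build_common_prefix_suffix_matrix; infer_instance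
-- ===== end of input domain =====

-- B computes each overlap by a KMP prefix-function pass over prefix + '\x00' + suffix
-- instead of A's per-pair scan comparing every prefix/suffix slice (alternative algorithm).

-- ===== PORT A =====
-- longest_common_prefix_suffix(prefix, suffix): upward scan keeping the last matching k
def pvLcps (p s : String) : Int :=
  let cp := p.toList
  let cs := s.toList
  let m : Int := (cp.length : Int)
  let n : Int := (cs.length : Int)
  (PySem.List.pyRange 1 (min m n + 1) 1).foldl
    (fun count k =>
      if PySem.Chars.slice cp none (some k) = PySem.Chars.slice cs (some (-k)) none then k
      else count) 0

def build_common_prefix_suffix_matrix (sequences : List String) : List (List Int) :=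
  let n : Int := (sequences.length : Int)
  (PySem.List.pyRange 0 n 1).map (fun i =>
    (PySem.List.pyRange 0 n 1).map (fun j =>
      pvLcps (PySem.List.pyGetD sequences i "") (PySem.List.pyGetD sequences j "")))

-- ===== PORT B =====
def pvSep : Char := Char.ofNat 0   -- the '\x00' separator of Source B

-- the 'while k > 0 and w[i] != w[k]: k = pi[k-1]' loop; fuel k is enough since k strictly decreases
def pvDescend (w : List Char) (pi : List Nat) (c : Char) : Nat → Nat → Nat
  | 0, k => k
  | fuel+1, k =>
    if 0 < k ∧ ¬ (w.getD k pvSep = c) then pvDescend w pi c fuel (pi.getD (k-1) 0)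
    else k

-- body of the 'for i in range(1, len(w))' iteration
def pvStep (w : List Char) (pi : List Nat) (i : Nat) : Nat :=
  let k0 := pi.getD (i-1) 0
  let k1 := pvDescend w pi (w.getD i pvSep) k0 k0
  if w.getD i pvSep = w.getD k1 pvSep then k1 + 1 else k1

-- pi after processing indices 1..t
def pvBuildPi (w : List Char) : Nat → List Nat
  | 0 => [0]
  | t+1 => let pi := pvBuildPi w t; pi ++ [pvStep w pi (t+1)]

def pvPrefixFun (w : List Char) : List Nat :=
  if w.length = 0 then [] else pvBuildPi w (w.length - 1)

-- _prefix_function(p + "\x00" + s)[-1]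
def pvOverlap (p s : String) : Int :=
  let w := p.toList ++ pvSep :: s.toList
  (((pvPrefixFun w).getLast?.getD 0 : Nat) : Int)

def build_common_prefix_suffix_matrix_alt (sequences : List String) : List (List Int) :=
  sequences.map (fun p => sequences.map (fun s => pvOverlap p s))

-- ===== PRECONDITION & SPEC =====
def Spec_build_common_prefix_suffix_matrix (sequences : List String) (out : List (List Int)) : Prop := out = build_common_prefix_suffix_matrix_alt sequences
instance (sequences : List String) (out : List (List Int)) : Decidable (Spec_build_common_prefix_suffix_matrix sequences out) := by unfold Spec_build_common_prefix_suffix_matrix; infer_instance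

-- ===== CLAIM (what is proved, stated in full; the proofs are below) =====
def Claim_equal_build_common_prefix_suffix_matrix : Prop := ∀ (sequences : List String), Dom_build_common_prefix_suffix_matrix sequences → Spec_build_common_prefix_suffix_matrix sequences (build_common_prefix_suffix_matrix sequences)

-- ===== LEMMAS AND PROOFS =====

-- k is a border of w: a prefix of length k that is also a suffix (k = |w| allowed)
def pvBorder (w : List Char) (k : Nat) : Bool := k ≤ w.length && w.take k == w.drop (w.length - k)

-- length of the longest PROPER border of w
def pvMaxB (w : List Char) : Nat := Nat.findGreatest (fun k => pvBorder w k = true) (w.length - 1)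

-- the per-pair specification both programs compute: greatest k with p[:k] == s[-k:]
def pvOvSpec (p s : List Char) : Nat :=
  Nat.findGreatest (fun k => (p.take k == s.drop (s.length - k)) = true) (min p.length s.length)

theorem pvBorder_zero (w : List Char) : pvBorder w 0 = true := by
  simp [pvBorder]

theorem pvBorder_le {w : List Char} {k : Nat} (h : pvBorder w k = true) : k ≤ w.length := by
  simp [pvBorder] at h; exact h.1

theorem pvMaxB_border (w : List Char) : pvBorder w (pvMaxB w) = true := by
  unfold pvMaxB
  exact Nat.findGreatest_spec (P := fun k => pvBorder w k = true) (Nat.zero_le _) (pvBorder_zero w)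

theorem pvMaxB_le (w : List Char) : pvMaxB w ≤ w.length - 1 :=
  Nat.findGreatest_le _

theorem le_pvMaxB {w : List Char} {k : Nat} (hk : k ≤ w.length - 1)
    (hb : pvBorder w k = true) : k ≤ pvMaxB w :=
  Nat.le_findGreatest hk hb

-- borders of a border are borders, and conversely (take/drop algebra)
theorem pvBorder_take_iff {w : List Char} {k j : Nat}
    (hk : pvBorder w k = true) (hjk : j ≤ k) :
    pvBorder (w.take k) j = pvBorder w j := by
  have hkl : k ≤ w.length := pvBorder_le hk
  have h2 : w.take k = w.drop (w.length - k) := by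
    simp only [pvBorder, Bool.and_eq_true, beq_iff_eq, decide_eq_true_eq] at hk
    exact hk.2
  have hlen : (w.take k).length = k := by rw [List.length_take]; omega
  have e1 : (w.take k).take j = w.take j := by rw [List.take_take, Nat.min_eq_left hjk]
  have e2 : (w.take k).drop ((w.take k).length - j) = w.drop (w.length - j) := by
    rw [hlen, h2, List.drop_drop]; congr 1; omega
  rw [pvBorder, pvBorder, e1, e2, hlen]
  simp [hjk, Nat.le_trans hjk hkl]

-- border of w ++ [c] of positive length k+1 ≤ |w|
theorem pvBorder_append {w : List Char} {c : Char} {k : Nat} (hk : k < w.length) :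
    pvBorder (w ++ [c]) (k+1) = (pvBorder w k && w.getD k pvSep == c) := by
  have h1 : k + 1 - w.length = 0 := by omega
  have e1 : (w ++ [c]).take (k+1) = w.take k ++ [w[k]] := by
    rw [List.take_append, h1, List.take_zero, List.append_nil, List.take_add_one,
        List.getElem?_eq_getElem hk, Option.toList_some]
  have hi : (w ++ [c]).length - (k+1) = w.length - k := by simp
  have h2 : w.length - k - w.length = 0 := by omega
  have e2 : (w ++ [c]).drop ((w ++ [c]).length - (k+1)) = w.drop (w.length - k) ++ [c] := by
    rw [hi, List.drop_append, h2, List.drop_zero]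
  have e3 : ∀ (a b : List Char) (x y : Char), ((a ++ [x]) == (b ++ [y])) = ((a == b) && (x == y)) := by
    intro a b x y
    simp
  rw [pvBorder, pvBorder, e1, e2, e3, List.getD_eq_getElem w pvSep hk]
  have h4 : decide (k + 1 ≤ (w ++ [c]).length) = true := by simp; omega
  have h5 : decide (k ≤ w.length) = true := by simp; omega
  rw [h4, h5]
  simp


theorem pvDescend_zero (w : List Char) (pi : List Nat) (c : Char) (k : Nat) :
    pvDescend w pi c 0 k = k := rfl

theorem pvDescend_succ (w : List Char) (pi : List Nat) (c : Char) (f k : Nat) :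
    pvDescend w pi c (f+1) k =
      (if 0 < k ∧ ¬ (w.getD k pvSep = c) then pvDescend w pi c f (pi.getD (k-1) 0) else k) := rfl

theorem pvTake_getD {w : List Char} {i k : Nat} (hk : k < i) (hi : i ≤ w.length) :
    (w.take i).getD k pvSep = w.getD k pvSep := by
  have h1 : k < (w.take i).length := by simp; omega
  have h2 : k < w.length := by omega
  rw [List.getD_eq_getElem _ _ h1, List.getD_eq_getElem _ _ h2, List.getElem_take]

theorem pvTake_succ {w : List Char} {i : Nat} (hi : i < w.length) :
    w.take (i+1) = w.take i ++ [w[i]] := by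
  rw [List.take_add_one, List.getElem?_eq_getElem hi, Option.toList_some]

theorem pvBorder_ext {w : List Char} {i j : Nat} (hi : i < w.length) (hj : j < i) :
    pvBorder (w.take (i+1)) (j+1) = (pvBorder (w.take i) j && w.getD j pvSep == w.getD i pvSep) := by
  have hlen : (w.take i).length = i := by simp; omega
  rw [pvTake_succ hi, pvBorder_append (by rw [hlen]; exact hj)]
  rw [pvTake_getD hj (by omega), List.getD_eq_getElem w pvSep hi]

-- at a stop of the descent (k = 0 or w[k] == w[i]) the conditional increment gives the new maximum
theorem pvStop_spec (w : List Char) (i k : Nat) (hi : i < w.length)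
    (hki : k < i) (hbk : pvBorder (w.take i) k = true)
    (Hmax : ∀ j, k < j → j < i → pvBorder (w.take i) j = true → ¬ (w.getD j pvSep = w.getD i pvSep))
    (hstop : k = 0 ∨ w.getD k pvSep = w.getD i pvSep) :
    (if w.getD i pvSep = w.getD k pvSep then k + 1 else k) = pvMaxB (w.take (i+1)) := by
  have hlen1 : (w.take (i+1)).length = i + 1 := by simp; omega
  have hMdef : pvMaxB (w.take (i+1)) = Nat.findGreatest (fun m => pvBorder (w.take (i+1)) m = true) i := by
    rw [pvMaxB, hlen1, Nat.add_sub_cancel]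
  by_cases hc : w.getD k pvSep = w.getD i pvSep
  · rw [if_pos hc.symm, hMdef]
    apply le_antisymm
    · apply Nat.le_findGreatest (by omega)
      rw [pvBorder_ext hi hki]
      simp only [hbk, Bool.true_and, beq_iff_eq]
      exact hc
    · by_contra hlt
      have hMle : Nat.findGreatest (fun m => pvBorder (w.take (i+1)) m = true) i ≤ i :=
        Nat.findGreatest_le _
      have hPM : pvBorder (w.take (i+1)) (Nat.findGreatest (fun m => pvBorder (w.take (i+1)) m = true) i) = true :=
        Nat.findGreatest_spec (P := fun m => pvBorder (w.take (i+1)) m = true) (Nat.zero_le _) (pvBorder_zero _)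
      obtain ⟨j, hj⟩ : ∃ j, Nat.findGreatest (fun m => pvBorder (w.take (i+1)) m = true) i = j + 1 :=
        ⟨Nat.findGreatest (fun m => pvBorder (w.take (i+1)) m = true) i - 1, by omega⟩
      rw [hj] at hPM hMle hlt
      rw [pvBorder_ext hi (by omega)] at hPM
      simp only [Bool.and_eq_true, beq_iff_eq] at hPM
      exact Hmax j (by omega) (by omega) hPM.1 hPM.2
  · have hk0 : k = 0 := by
      rcases hstop with h | h
      · exact h
      · exact absurd h hc
    subst hk0
    rw [if_neg (fun h => hc h.symm), hMdef]
    symm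
    rw [Nat.findGreatest_eq_zero_iff]
    intro m hm0 hmi hPm
    obtain ⟨j, hj⟩ : ∃ j, m = j + 1 := ⟨m - 1, by omega⟩
    rw [hj] at hPm hmi
    rw [pvBorder_ext hi (by omega)] at hPm
    simp only [Bool.and_eq_true, beq_iff_eq] at hPm
    rcases Nat.eq_zero_or_pos j with hj0 | hj0
    · rw [hj0] at hPm; exact hc hPm.2
    · exact Hmax j hj0 (by omega) hPm.1 hPm.2

-- correctness of the descent + increment, given correct earlier pi entries
theorem pvDescend_spec (w : List Char) (pi : List Nat) (i : Nat)
    (hi : i < w.length)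
    (Hpi : ∀ t, t < i → pi.getD t 0 = pvMaxB (w.take (t+1))) :
    ∀ k fuel, k ≤ fuel → k < i → pvBorder (w.take i) k = true →
    (∀ j, k < j → j < i → pvBorder (w.take i) j = true → ¬ (w.getD j pvSep = w.getD i pvSep)) →
    (let k1 := pvDescend w pi (w.getD i pvSep) fuel k;
     (if w.getD i pvSep = w.getD k1 pvSep then k1 + 1 else k1) = pvMaxB (w.take (i+1))) := by
  intro k
  induction k using Nat.strong_induction_on with
  | _ k IH =>
    intro fuel hfuel hki hbk Hmax
    cases fuel with
    | zero =>
      have hk0 : k = 0 := by omega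
      subst hk0
      show (if w.getD i pvSep = w.getD (pvDescend w pi (w.getD i pvSep) 0 0) pvSep
            then pvDescend w pi (w.getD i pvSep) 0 0 + 1 else pvDescend w pi (w.getD i pvSep) 0 0)
           = pvMaxB (w.take (i+1))
      rw [pvDescend_zero]
      exact pvStop_spec w i 0 hi hki hbk Hmax (Or.inl rfl)
    | succ f =>
      by_cases hcond : 0 < k ∧ ¬ (w.getD k pvSep = w.getD i pvSep)
      · have hdes : pvDescend w pi (w.getD i pvSep) (f+1) k
            = pvDescend w pi (w.getD i pvSep) f (pi.getD (k-1) 0) := by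
          rw [pvDescend_succ, if_pos hcond]
        have hpi : pi.getD (k-1) 0 = pvMaxB (w.take k) := by
          have h := Hpi (k-1) (by omega)
          rwa [Nat.sub_add_cancel hcond.1] at h
        have hlenk : (w.take k).length = k := by simp; omega
        have hmle : pvMaxB (w.take k) ≤ k - 1 := by
          have h := pvMaxB_le (w.take k)
          rwa [hlenk] at h
        have htt : (w.take i).take k = w.take k := by
          rw [List.take_take, Nat.min_eq_left (le_of_lt hki)]
        have hbk' : pvBorder (w.take i) (pvMaxB (w.take k)) = true := by
          rw [← pvBorder_take_iff hbk (by omega), htt]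
          exact pvMaxB_border _
        have Hmax' : ∀ j, pvMaxB (w.take k) < j → j < i → pvBorder (w.take i) j = true →
            ¬ (w.getD j pvSep = w.getD i pvSep) := by
          intro j hj1 hj2 hbj
          rcases lt_trichotomy j k with hlt | heq | hgt
          · exfalso
            have hbtj : pvBorder (w.take k) j = true := by
              rw [← htt, pvBorder_take_iff hbk (le_of_lt hlt)]
              exact hbj
            have := le_pvMaxB (w := w.take k) (by rw [hlenk]; omega) hbtj
            omega
          · subst heq
            exact hcond.2
          · exact Hmax j hgt hj2 hbj
        have hres := IH (pvMaxB (w.take k)) (by omega) f (by omega) (by omega) hbk' Hmax'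
        show (if w.getD i pvSep = w.getD (pvDescend w pi (w.getD i pvSep) (f+1) k) pvSep
              then pvDescend w pi (w.getD i pvSep) (f+1) k + 1
              else pvDescend w pi (w.getD i pvSep) (f+1) k)
             = pvMaxB (w.take (i+1))
        rw [hdes, hpi]
        exact hres
      · have hdes : pvDescend w pi (w.getD i pvSep) (f+1) k = k := by
          rw [pvDescend_succ, if_neg hcond]
        have hstop : k = 0 ∨ w.getD k pvSep = w.getD i pvSep := by
          by_cases h0 : k = 0
          · exact Or.inl h0
          · right
            by_contra hne
            exact hcond ⟨Nat.pos_of_ne_zero h0, hne⟩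
        show (if w.getD i pvSep = w.getD (pvDescend w pi (w.getD i pvSep) (f+1) k) pvSep
              then pvDescend w pi (w.getD i pvSep) (f+1) k + 1
              else pvDescend w pi (w.getD i pvSep) (f+1) k)
             = pvMaxB (w.take (i+1))
        rw [hdes]
        exact pvStop_spec w i k hi hki hbk Hmax hstop

-- invariant of the build loop
theorem pvBuildPi_spec (w : List Char) :
    ∀ t, t + 1 ≤ w.length →
      (pvBuildPi w t).length = t + 1 ∧
      ∀ j, j ≤ t → (pvBuildPi w t).getD j 0 = pvMaxB (w.take (j+1)) := by
  intro t
  induction t with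
  | zero =>
    intro hle
    refine ⟨rfl, ?_⟩
    intro j hj
    interval_cases j
    have hlen : (w.take 1).length = 1 := by simp; omega
    rw [pvMaxB, hlen]
    simp [pvBuildPi]
  | succ t IH =>
    intro hle
    obtain ⟨IHlen, IHval⟩ := IH (by omega)
    have hit : t + 1 < w.length := by omega
    have hk0 : (pvBuildPi w t).getD (t+1-1) 0 = pvMaxB (w.take (t+1)) := by
      have := IHval t (Nat.le_refl t)
      simpa using this
    have hlent1 : (w.take (t+1)).length = t + 1 := by simp; omega
    have hkmax : pvMaxB (w.take (t+1)) ≤ t := by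
      have h := pvMaxB_le (w.take (t+1))
      omega
    have hstep : pvStep w (pvBuildPi w t) (t+1) = pvMaxB (w.take (t+2)) := by
      show (if w.getD (t+1) pvSep
              = w.getD (pvDescend w (pvBuildPi w t) (w.getD (t+1) pvSep)
                  ((pvBuildPi w t).getD (t+1-1) 0) ((pvBuildPi w t).getD (t+1-1) 0)) pvSep
            then pvDescend w (pvBuildPi w t) (w.getD (t+1) pvSep)
                  ((pvBuildPi w t).getD (t+1-1) 0) ((pvBuildPi w t).getD (t+1-1) 0) + 1
            else pvDescend w (pvBuildPi w t) (w.getD (t+1) pvSep)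
                  ((pvBuildPi w t).getD (t+1-1) 0) ((pvBuildPi w t).getD (t+1-1) 0))
           = pvMaxB (w.take (t+2))
      rw [hk0]
      exact pvDescend_spec w (pvBuildPi w t) (t+1) hit
        (fun t' ht' => IHval t' (by omega))
        (pvMaxB (w.take (t+1))) (pvMaxB (w.take (t+1))) (Nat.le_refl _) (by omega)
        (pvMaxB_border _)
        (fun j hj1 hj2 hbj => absurd (le_pvMaxB (by omega) hbj) (by omega))
    refine ⟨by simp [pvBuildPi, IHlen], ?_⟩
    intro j hj
    rcases Nat.lt_or_ge j (t+1) with hjt | hjt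
    · show (pvBuildPi w t ++ [pvStep w (pvBuildPi w t) (t+1)]).getD j 0 = _
      rw [List.getD_append _ _ _ _ (by omega)]
      exact IHval j (by omega)
    · have hj1 : j = t + 1 := by omega
      subst hj1
      show (pvBuildPi w t ++ [pvStep w (pvBuildPi w t) (t+1)]).getD (t+1) 0 = _
      have hidx : t + 1 < (pvBuildPi w t ++ [pvStep w (pvBuildPi w t) (t+1)]).length := by
        simp [IHlen]
      rw [List.getD_eq_getElem _ _ hidx, List.getElem_append_right (by omega)]
      simp only [IHlen]
      simpa using hstep

theorem pvPrefixFun_last {w : List Char} (hw : w ≠ []) :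
    (pvPrefixFun w).getLast?.getD 0 = pvMaxB w := by
  have hw1 : 1 ≤ w.length := by
    cases w with
    | nil => exact absurd rfl hw
    | cons a l => simp
  obtain ⟨hlen, hval⟩ := pvBuildPi_spec w (w.length - 1) (by omega)
  have hlen' : (pvBuildPi w (w.length - 1)).length = w.length := by omega
  rw [pvPrefixFun, if_neg (by omega)]
  rw [List.getLast?_eq_getElem?, ← List.getD_eq_getElem?_getD, hlen']
  rw [hval (w.length - 1) (Nat.le_refl _)]
  congr 1
  rw [Nat.sub_add_cancel hw1, List.take_length]

-- with a separator absent from p and s, the longest proper border of p ++ sep :: s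
-- is exactly the longest common prefix/suffix overlap
theorem pvMaxB_sep (p s : List Char) (hp : pvSep ∉ p) (hs : pvSep ∉ s) :
    pvMaxB (p ++ pvSep :: s) = pvOvSpec p s := by
  have hwl : (p ++ pvSep :: s).length = p.length + s.length + 1 := by
    simp only [List.length_append, List.length_cons]; omega
  -- characterization of the borders of p ++ sep :: s
  have key : ∀ k, k ≤ p.length + s.length →
      (pvBorder (p ++ pvSep :: s) k = true ↔
        (k ≤ min p.length s.length ∧ (p.take k == s.drop (s.length - k)) = true)) := by
    intro k hk
    by_cases hmin : k ≤ min p.length s.length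
    · -- both sides live inside p and s
      have e1 : (p ++ pvSep :: s).take k = p.take k := by
        rw [List.take_append]
        have h0 : k - p.length = 0 := by omega
        rw [h0, List.take_zero, List.append_nil]
      have e2 : (p ++ pvSep :: s).drop ((p ++ pvSep :: s).length - k) = s.drop (s.length - k) := by
        rw [hwl, List.drop_append, List.drop_eq_nil_of_le (by omega), List.nil_append]
        have h1 : p.length + s.length + 1 - k - p.length = (s.length - k) + 1 := by omega
        rw [h1, List.drop_succ_cons]
      rw [pvBorder, e1, e2]
      simp only [hmin, true_and, Bool.and_eq_true, decide_eq_true_eq]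
      constructor
      · intro h; exact h.2
      · intro h; exact ⟨by rw [hwl]; omega, h⟩
    · -- k exceeds min: no border (the separator would have to equal a non-separator)
      have hsep : ((pvSep :: s) : List Char)[0]? = some pvSep := rfl
      have hne : ¬ ((p ++ pvSep :: s).take k = (p ++ pvSep :: s).drop ((p ++ pvSep :: s).length - k)) := by
        intro E
        by_cases hm : p.length < k
        · -- index p.length: sep on the take side, a character of s on the drop side
          have hA : ((p ++ pvSep :: s).take k)[p.length]? = some pvSep := by
            rw [List.getElem?_take, if_pos hm, List.getElem?_append_right (Nat.le_refl _)]
            simp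
          have hB : ((p ++ pvSep :: s).drop ((p ++ pvSep :: s).length - k))[p.length]?
              = s[(p ++ pvSep :: s).length - k - 1]? := by
            rw [List.getElem?_drop, List.getElem?_append_right (by omega)]
            have h2 : (p ++ pvSep :: s).length - k + p.length - p.length
                = ((p ++ pvSep :: s).length - k - 1) + 1 := by rw [hwl]; omega
            rw [h2, List.getElem?_cons_succ]
          have hEq := congrArg (fun l => l[p.length]?) E
          simp only at hEq
          rw [hA, hB] at hEq
          exact hs (List.mem_of_getElem? hEq.symm)
        · -- s.length < k ≤ p.length: sep on the drop side, a character of p on the take side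
          have hsl : s.length < k := by omega
          have hA : ((p ++ pvSep :: s).take k)[k - s.length - 1]? = p[k - s.length - 1]? := by
            rw [List.getElem?_take, if_pos (by omega), List.getElem?_append_left (by omega)]
          have hB : ((p ++ pvSep :: s).drop ((p ++ pvSep :: s).length - k))[k - s.length - 1]?
              = some pvSep := by
            rw [List.getElem?_drop]
            have h2 : (p ++ pvSep :: s).length - k + (k - s.length - 1) = p.length := by
              rw [hwl]; omega
            rw [h2, List.getElem?_append_right (Nat.le_refl _)]
            simp
          have hEq := congrArg (fun l => l[k - s.length - 1]?) E
          simp only at hEq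
          rw [hA, hB] at hEq
          exact hp (List.mem_of_getElem? hEq)
      constructor
      · intro h
        exfalso
        simp only [pvBorder, Bool.and_eq_true, beq_iff_eq, decide_eq_true_eq] at h
        exact hne h.2
      · intro h
        exact absurd h.1 hmin
  -- both maxima agree
  have hQ0 : (p.take 0 == s.drop (s.length - 0)) = true := by simp
  apply le_antisymm
  · have ha : pvBorder (p ++ pvSep :: s) (pvMaxB (p ++ pvSep :: s)) = true :=
      pvMaxB_border (p ++ pvSep :: s)
    have hale : pvMaxB (p ++ pvSep :: s) ≤ p.length + s.length := by
      have h := pvMaxB_le (p ++ pvSep :: s)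
      rw [hwl] at h
      omega
    obtain ⟨h1, h2⟩ := (key _ hale).mp ha
    exact Nat.le_findGreatest h1 h2
  · have hble : pvOvSpec p s ≤ min p.length s.length := Nat.findGreatest_le _
    have hQb : (p.take (pvOvSpec p s) == s.drop (s.length - pvOvSpec p s)) = true :=
      Nat.findGreatest_spec (P := fun k => (p.take k == s.drop (s.length - k)) = true)
        (Nat.zero_le _) hQ0
    have hPb : pvBorder (p ++ pvSep :: s) (pvOvSpec p s) = true :=
      (key _ (by omega)).mpr ⟨hble, hQb⟩
    exact le_pvMaxB (by rw [hwl]; omega) hPb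

-- A's scan computes the same findGreatest
theorem pvLcps_eq (p s : String) : pvLcps p s = (pvOvSpec p.toList s.toList : Int) := by
  have main : ∀ (M : Nat),
      (List.range M).foldl
        (fun (count : Int) (t : Nat) =>
          if p.toList.take (t+1) = s.toList.drop (s.toList.length - (t+1))
          then (((t+1 : Nat)) : Int) else count) 0
      = ((Nat.findGreatest
            (fun k => (p.toList.take k == s.toList.drop (s.toList.length - k)) = true) M : Nat) : Int) := by
    intro M
    induction M with
    | zero => simp
    | succ M IH =>
      rw [List.range_succ, List.foldl_append, List.foldl_cons, List.foldl_nil, IH,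
          Nat.findGreatest_succ]
      by_cases hC : p.toList.take (M+1) = s.toList.drop (s.toList.length - (M+1))
      · rw [if_pos hC, if_pos (by simp only [beq_iff_eq]; exact hC)]
      · rw [if_neg hC, if_neg (by simp only [beq_iff_eq]; exact hC)]
  show (PySem.List.pyRange 1 (min (p.toList.length : Int) (s.toList.length : Int) + 1) 1).foldl
        (fun count k =>
          if PySem.Chars.slice p.toList none (some k) = PySem.Chars.slice s.toList (some (-k)) none
          then k else count) 0
      = (pvOvSpec p.toList s.toList : Int)
  rw [← Nat.cast_min, PySem.List.pyRange_one]
  have hM : ((((min p.toList.length s.toList.length : Nat)) : Int) + 1 - 1).toNat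
      = min p.toList.length s.toList.length := by omega
  rw [hM, List.foldl_map]
  have hfun : ∀ (count : Int) (t : Nat),
      (if PySem.Chars.slice p.toList none (some (1 + (t : Int)))
            = PySem.Chars.slice s.toList (some (-(1 + (t : Int)))) none
        then (1 + (t : Int)) else count)
      = (if p.toList.take (t+1) = s.toList.drop (s.toList.length - (t+1))
          then (((t+1 : Nat)) : Int) else count) := by
    intro count t
    have hcast : (1 + (t : Int)) = (((t+1 : Nat)) : Int) := by push_cast; ring
    rw [hcast]
    rw [show PySem.Chars.slice p.toList none (some (((t+1 : Nat)) : Int))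
          = p.toList.take (t+1) from by
        rw [show PySem.Chars.slice p.toList none (some (((t+1 : Nat)) : Int))
              = PySem.List.slice p.toList none (some (((t+1 : Nat)) : Int)) from rfl,
            PySem.List.slice_to p.toList (b := (((t+1 : Nat)) : Int)) (by omega)]
        simp]
    rw [show PySem.Chars.slice s.toList (some (-(((t+1 : Nat)) : Int))) none
          = s.toList.drop (s.toList.length - (t+1)) from by
        rw [show PySem.Chars.slice s.toList (some (-(((t+1 : Nat)) : Int))) none
              = PySem.List.slice s.toList (some (-(((t+1 : Nat)) : Int))) none from rfl,
            PySem.List.slice_from_neg_natCast s.toList (t+1) (by omega)]]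
  rw [show (fun (count : Int) (t : Nat) =>
        if PySem.Chars.slice p.toList none (some (1 + (t : Int)))
            = PySem.Chars.slice s.toList (some (-(1 + (t : Int)))) none
        then (1 + (t : Int)) else count)
      = (fun (count : Int) (t : Nat) =>
        if p.toList.take (t+1) = s.toList.drop (s.toList.length - (t+1))
        then (((t+1 : Nat)) : Int) else count)
      from funext fun c => funext fun t => hfun c t]
  rw [main]
  rfl

theorem pvOverlap_eq (p s : String)
    (hp : pvSep ∉ p.toList) (hs : pvSep ∉ s.toList) :
    pvLcps p s = pvOverlap p s := by
  show pvLcps p s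
      = (((pvPrefixFun (p.toList ++ pvSep :: s.toList)).getLast?.getD 0 : Nat) : Int)
  rw [pvPrefixFun_last (by simp), pvMaxB_sep p.toList s.toList hp hs, pvLcps_eq]

-- ===== VERDICT (by name: the statement is the Claim_ definition above) =====
theorem build_common_prefix_suffix_matrix_spec : Claim_equal_build_common_prefix_suffix_matrix := by
  intro seqs hdom
  unfold Spec_build_common_prefix_suffix_matrix
  have hsep : ∀ x ∈ seqs, pvSep ∉ x.toList := by
    intro x hx hmem
    unfold Dom_build_common_prefix_suffix_matrix at hdom
    rw [List.all_eq_true] at hdom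
    have hx' := hdom x hx
    rw [pvDomStr, List.all_eq_true] at hx'
    have hc := hx' pvSep hmem
    simp [pvDomChar, pvSep] at hc
  have hmap : ∀ {β : Type} (F : String → β),
      (PySem.List.pyRange 0 (seqs.length : Int) 1).map (fun i => F (PySem.List.pyGetD seqs i ""))
      = seqs.map F := by
    intro β F
    have h1 : (PySem.List.pyRange 0 (seqs.length : Int) 1).map
          (fun i => F (PySem.List.pyGetD seqs i ""))
        = ((PySem.List.pyRange 0 (seqs.length : Int) 1).map
            (fun i => PySem.List.pyGetD seqs i "")).map F := by
      rw [List.map_map]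
      rfl
    rw [h1, PySem.List.map_pyGetD_pyRange_zero']
  show (PySem.List.pyRange 0 (seqs.length : Int) 1).map
      (fun i => (PySem.List.pyRange 0 (seqs.length : Int) 1).map
        (fun j => pvLcps (PySem.List.pyGetD seqs i "") (PySem.List.pyGetD seqs j "")))
    = seqs.map (fun p => seqs.map (fun s => pvOverlap p s))
  rw [hmap (fun p => (PySem.List.pyRange 0 (seqs.length : Int) 1).map
      (fun j => pvLcps p (PySem.List.pyGetD seqs j "")))]
  apply List.map_congr_left
  intro p hp
  exact (hmap (fun s => pvLcps p s)).trans
    (List.map_congr_left (fun x hx => pvOverlap_eq p x (hsep p hp) (hsep x hx)))
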